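-- pv_equiv track=rewrite | github.com/JZygmuntowicz/BACTERIA_PARSER | OLAMA_SEARCH.py | trim_context
-- ===== SOURCE A (Python) =====
-- MAX_FINAL_CONTEXT_CHARS = 10000
--
-- def trim_context(evidence):
--     joined = " ||| ".join(evidence)
--     if len(joined) <= MAX_FINAL_CONTEXT_CHARS:
--         return joined
--     out, size = [], 0
--     for ev in evidence:
--         need = len(ev)+5
--         if size+need > MAX_FINAL_CONTEXT_CHARS: break
--         out.append(ev)
--         size += need
--     return " ||| ".join(out)
-- ===== SOURCE B (Python) =====
-- MAX_FINAL_CONTEXT_CHARS = 10000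
--
-- def trim_context(evidence):
--     joined = " ||| ".join(evidence)
--     if len(joined) <= MAX_FINAL_CONTEXT_CHARS:
--         return joined
--     # build the table of running cumulative costs, then count how many stay within the limit
--     cums = []
--     total = 0
--     for ev in evidence:
--         total += len(ev) + 5
--         cums.append(total)
--     k = sum(1 for t in cums if t <= MAX_FINAL_CONTEXT_CHARS)
--     return " ||| ".join(evidence[:k])
-- ===== Notes on version B (the rewrite author's own statement) =====
-- stated objective: alternative
-- what changed: Replaces A's accumulate-and-break scan with building the full cumulative-cost table, counting how many running totals stay within the limit, and joining that prefix via a slice.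
import Mathlib
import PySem

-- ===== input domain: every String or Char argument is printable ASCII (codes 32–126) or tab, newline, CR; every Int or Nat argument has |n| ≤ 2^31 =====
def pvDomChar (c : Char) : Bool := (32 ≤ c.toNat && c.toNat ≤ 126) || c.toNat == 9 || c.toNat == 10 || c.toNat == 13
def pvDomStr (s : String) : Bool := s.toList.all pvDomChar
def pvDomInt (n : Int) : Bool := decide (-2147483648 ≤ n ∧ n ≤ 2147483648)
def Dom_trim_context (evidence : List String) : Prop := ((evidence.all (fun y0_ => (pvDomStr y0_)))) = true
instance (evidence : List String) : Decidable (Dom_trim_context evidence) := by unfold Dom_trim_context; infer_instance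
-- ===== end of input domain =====

-- B replaces A's accumulate-and-break scan by a cumulative-cost table plus a counting pass (alternative decomposition, same cost).

-- ===== PORT A =====
-- A's for-loop with break: carries the output list and the running size
def trimLoopA : List String → List String → Int → List String
  | [], out, _ => out
  | ev :: rest, out, size =>
      let need := PySem.Str.len ev + 5
      if size + need > 10000 then out
      else trimLoopA rest (out ++ [ev]) (size + need)

def trim_context (evidence : List String) : String :=
  let joined := PySem.Str.join " ||| " evidence
  if PySem.Str.len joined ≤ 10000 then joined
  else PySem.Str.join " ||| " (trimLoopA evidence [] 0)

-- ===== PORT B =====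
-- Source B's table-building loop: running totals of len(ev)+5
def cumsB : Int → List String → List Int
  | _, [] => []
  | total, ev :: rest =>
      let t := total + (PySem.Str.len ev + 5)
      t :: cumsB t rest

def trim_context_alt (evidence : List String) : String :=
  let joined := PySem.Str.join " ||| " evidence
  if PySem.Str.len joined ≤ 10000 then joined
  else
    let cums := cumsB 0 evidence
    let k := cums.countP (fun t => decide (t ≤ 10000))
    PySem.Str.join " ||| " (evidence.take k)

-- ===== PRECONDITION & SPEC =====
def Spec_trim_context (evidence : List String) (out : String) : Prop := out = trim_context_alt evidence
instance (evidence : List String) (out : String) : Decidable (Spec_trim_context evidence out) := by unfold Spec_trim_context; infer_instance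

-- ===== CLAIM (what is proved, stated in full; the proofs are below) =====
def Claim_equal_trim_context : Prop := ∀ (evidence : List String), Dom_trim_context evidence → Spec_trim_context evidence (trim_context evidence)

-- ===== LEMMAS AND PROOFS =====
theorem cumsB_ge (evs : List String) (s : Int) (x : Int) (hx : x ∈ cumsB s evs) : s ≤ x := by
  induction evs generalizing s with
  | nil => simp [cumsB] at hx
  | cons ev rest ih =>
    simp only [cumsB, List.mem_cons] at hx
    have hlen : (0 : Int) ≤ PySem.Str.len ev := by
      simp [PySem.Str.len_eq]
    rcases hx with h | h
    · omega
    · have := ih _ h; omega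

theorem cumsB_countP_zero (evs : List String) (s : Int) (hs : 10000 < s) :
    (cumsB s evs).countP (fun t => decide (t ≤ 10000)) = 0 := by
  rw [List.countP_eq_zero]
  intro x hx
  have := cumsB_ge evs s x hx
  simp; omega

theorem trimLoopA_eq (evs : List String) (out : List String) (size : Int) :
    trimLoopA evs out size =
      out ++ evs.take ((cumsB size evs).countP (fun t => decide (t ≤ 10000))) := by
  induction evs generalizing out size with
  | nil => simp [trimLoopA, cumsB]
  | cons ev rest ih =>
    simp only [trimLoopA, cumsB, List.countP_cons, PySem.Str.len_eq]
    by_cases h : size + ((ev.toList.length : Int) + 5) > 10000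
    · rw [if_pos h, cumsB_countP_zero rest _ (by omega),
        if_neg (show ¬(decide (size + ((ev.toList.length : Int) + 5) ≤ 10000) = true) by simp only [decide_eq_true_eq]; omega)]
      simp
    · rw [if_neg h, ih,
        if_pos (show decide (size + ((ev.toList.length : Int) + 5) ≤ 10000) = true by simp only [decide_eq_true_eq]; omega)]
      simp [List.take_succ_cons]

-- ===== VERDICT (by name: the statement is the Claim_ definition above) =====
theorem trim_context_spec : Claim_equal_trim_context := by
  intro evidence _
  unfold Spec_trim_context trim_context trim_context_alt
  by_cases h : PySem.Str.len (PySem.Str.join " ||| " evidence) ≤ 10000 <;>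
    simp only [h] <;> simp [trimLoopA_eq]
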